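-- pv_equiv track=rewrite | github.com/OleksiiChornyi/CheckIO | Elementary/Remove All Before/Remove All Before/Remove_All_Before.py | remove_all_before
-- ===== SOURCE A (Python) =====
-- from typing import Iterable
--
-- def remove_all_before(items: list, border: int) -> Iterable:
--     items.append(border)
--     l: int = len(items)
--     i: int = -1
--     if items.index(border, 0, l) == len(items)-1:
--         items.remove(border)
--         return items
--     else:
--         items.pop(len(items)-1)
--     l = len(items)
--     if items.index(border, 0, l) >= 0:
--         i = items.index(border, 0, l)-1
--         while i >= 0 and i < len(items)-1:
--             items.pop(i)
--             i = i - 1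
--             if i == 0:
--                 items.pop(i)
--                 break
--     return items
-- ===== SOURCE B (Python) =====
-- def remove_all_before(items: list, border: int):
--     try:
--         idx = items.index(border)
--     except ValueError:
--         return items
--     del items[:idx]
--     return items
-- ===== Notes on version B (the rewrite author's own statement) =====
-- stated objective: idiomatic
-- what changed: B replaces A's sentinel-append membership test and element-by-element down-counting pop loop with a try/except on items.index and a single bulk slice deletion del items[:idx].
import Mathlib
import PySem

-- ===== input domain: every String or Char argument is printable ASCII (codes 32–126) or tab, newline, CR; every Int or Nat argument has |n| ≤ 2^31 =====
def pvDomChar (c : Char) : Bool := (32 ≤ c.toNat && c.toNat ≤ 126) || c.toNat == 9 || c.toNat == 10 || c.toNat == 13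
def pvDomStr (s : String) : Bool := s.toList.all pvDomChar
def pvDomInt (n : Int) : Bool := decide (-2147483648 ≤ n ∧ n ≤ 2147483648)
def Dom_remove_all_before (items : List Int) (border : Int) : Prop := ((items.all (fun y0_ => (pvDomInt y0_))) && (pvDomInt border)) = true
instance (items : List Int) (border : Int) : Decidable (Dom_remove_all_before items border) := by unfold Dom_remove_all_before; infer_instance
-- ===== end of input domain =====

-- B replaces A's sentinel-append membership test and down-counting pop loop with find-index + one bulk prefix deletion
-- (idiomatic); both Pythons mutate `items` in place identically and return the same object, so the return-value
-- equivalence proved here also covers the final state of the argument.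

-- ===== PORT A =====
-- Python A's while loop: `while i >= 0 and i < len(items)-1: items.pop(i); i -= 1; if i == 0: items.pop(i); break`
def removeAllBeforeLoop (xs : List Int) (i : Int) : List Int :=
  if h : 0 ≤ i ∧ i < (xs.length : Int) - 1 then
    match PySem.List.pop? xs i with
    | none => xs          -- unreachable guard (index in range by h)
    | some (_, xs') =>
      if i - 1 = 0 then
        match PySem.List.pop? xs' (i - 1) with
        | none => xs'     -- unreachable guard
        | some (_, xs'') => xs''
      else removeAllBeforeLoop xs' (i - 1)
  else xs
termination_by (i + 1).toNat
decreasing_by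
  have := h.1; omega

def remove_all_before (items : List Int) (border : Int) : List Int :=
  -- items.append(border): every later step works on items ++ [border]
  match PySem.List.index? (items ++ [border]) border with
  | none => items ++ [border]        -- unreachable guard (border ∈ the appended list; .index cannot raise here)
  | some j =>
    if j = (items ++ [border]).length - 1 then
      -- items.remove(border); return items
      match PySem.List.remove? (items ++ [border]) border with
      | none => items ++ [border]    -- unreachable guard
      | some r => r
    else
      -- items.pop(len(items)-1)
      match PySem.List.pop? (items ++ [border]) (((items ++ [border]).length : Int) - 1) with
      | none => items ++ [border]    -- unreachable guard
      | some (_, items2) =>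
        match PySem.List.index? items2 border with
        | none => items2  -- unreachable guard
        | some j2 =>
          if (j2 : Int) ≥ 0 then
            removeAllBeforeLoop items2 ((j2 : Int) - 1)
          else items2

-- ===== PORT B =====
def remove_all_before_alt (items : List Int) (border : Int) : List Int :=
  match PySem.List.index? items border with
  | none => items                 -- except ValueError: return items
  | some idx => items.drop idx    -- del items[:idx]; return items

-- ===== PRECONDITION & SPEC =====
def Spec_remove_all_before (items : List Int) (border : Int) (out : List Int) : Prop := out = remove_all_before_alt items border
instance (items : List Int) (border : Int) (out : List Int) : Decidable (Spec_remove_all_before items border out) := by unfold Spec_remove_all_before; infer_instance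

-- ===== CLAIM (what is proved, stated in full; the proofs are below) =====
def Claim_equal_remove_all_before : Prop := ∀ (items : List Int) (border : Int), Dom_remove_all_before items border → Spec_remove_all_before items border (remove_all_before items border)

-- ===== LEMMAS AND PROOFS =====

theorem eraseIdx_drop (xs : List Int) (k : Nat) (h : k < xs.length) :
    (xs.eraseIdx k).drop k = xs.drop (k + 1) := by
  rw [List.eraseIdx_eq_take_drop_succ]
  rw [List.drop_append_of_le_length (by simp; omega)]
  simp

theorem removeAllBeforeLoop_neg (xs : List Int) (i : Int) (h : i < 0) :
    removeAllBeforeLoop xs i = xs := by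
  unfold removeAllBeforeLoop
  rw [dif_neg]; omega

theorem removeAllBeforeLoop_drop (n : Nat) (xs : List Int) (h : n + 1 < xs.length) :
    removeAllBeforeLoop xs (n : Int) = xs.drop (n + 1) := by
  induction n generalizing xs with
  | zero =>
    unfold removeAllBeforeLoop
    rw [dif_pos (by constructor <;> omega)]
    rw [PySem.List.pop?_natCast xs 0 (by omega)]
    dsimp only
    rw [if_neg (by omega)]
    rw [removeAllBeforeLoop_neg _ _ (by omega)]
    simp [List.eraseIdx_eq_take_drop_succ]
  | succ m ih =>
    unfold removeAllBeforeLoop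
    rw [dif_pos (by constructor <;> omega)]
    rw [PySem.List.pop?_natCast xs (m+1) (by omega)]
    by_cases hm : m = 0
    · subst hm
      simp only [show ((1 : Nat) : Int) - 1 = 0 by norm_num, if_true]
      rw [show (0 : Int) = ((0 : Nat) : Int) by norm_num]
      rw [PySem.List.pop?_natCast (xs.eraseIdx (0 + 1)) 0 (by rw [List.length_eraseIdx_of_lt (by omega)]; omega)]
      have h1 : (xs.eraseIdx 1).eraseIdx 0 = (xs.eraseIdx 1).drop 1 := by
        cases xs.eraseIdx 1 <;> simp
      rw [h1, eraseIdx_drop xs 1 (by omega)]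
    · have hif : ((m + 1 : Nat) : Int) - 1 ≠ 0 := by omega
      simp only [hif, if_false]
      rw [show ((m + 1 : Nat) : Int) - 1 = ((m : Nat) : Int) by push_cast; ring]
      rw [ih (xs.eraseIdx (m + 1)) (by rw [List.length_eraseIdx_of_lt (by omega)]; omega)]
      rw [eraseIdx_drop xs (m + 1) (by omega)]

theorem eraseIdx_append_singleton (l : List Int) (x : Int) :
    (l ++ [x]).eraseIdx l.length = l := by
  rw [List.eraseIdx_eq_take_drop_succ]
  simp

-- ===== VERDICT (by name: the statement is the Claim_ definition above) =====
theorem remove_all_before_spec : Claim_equal_remove_all_before := by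
  intro items border _
  unfold Spec_remove_all_before remove_all_before remove_all_before_alt
  by_cases hmem : border ∈ items
  · -- border occurs in items: A takes the pop-loop branch, loop drops the prefix
    obtain ⟨idx, hidx⟩ : ∃ k, PySem.List.index? items border = some k := by
      have := (PySem.List.index?_isSome_iff items border).mpr hmem
      exact Option.isSome_iff_exists.mp this
    have hlt : idx < items.length := by
      obtain ⟨hk, _, _⟩ := PySem.List.getElem_of_index?_eq_some hidx
      exact hk
    rw [PySem.List.index?_append_of_mem [border] hmem, hidx]
    simp only
    have hne : idx ≠ (items ++ [border]).length - 1 := by simp; omega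
    rw [if_neg hne]
    have hpop : PySem.List.pop? (items ++ [border]) (((items ++ [border]).length : Int) - 1)
        = some (border, items) := by
      rw [show (((items ++ [border]).length : Int) - 1) = ((items.length : Nat) : Int) by simp]
      rw [PySem.List.pop?_natCast (items ++ [border]) items.length (by simp)]
      rw [eraseIdx_append_singleton]
      simp
    rw [hpop]
    simp only [hidx]
    rw [if_pos (by positivity)]
    by_cases h0 : idx = 0
    · subst h0
      rw [removeAllBeforeLoop_neg _ _ (by norm_num)]
      simp
    · obtain ⟨m, hm⟩ : ∃ m, idx = m + 1 := ⟨idx - 1, by omega⟩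
      subst hm
      rw [show ((m + 1 : Nat) : Int) - 1 = ((m : Nat) : Int) by push_cast; ring]
      rw [removeAllBeforeLoop_drop m items (by omega)]
  · -- border absent: A's sentinel is found at the end and removed again
    rw [PySem.List.index?_append_singleton_self items border hmem]
    simp only
    rw [if_pos (by simp)]
    have : PySem.List.remove? (items ++ [border]) border = some items := by
      rw [PySem.List.remove?_eq_some_erase (items ++ [border]) border (by simp)]
      rw [List.erase_append_right _ hmem]
      simp
    rw [this]
    rw [(PySem.List.index?_eq_none_iff items border).mpr hmem]
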